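-- pv_equiv track=rewrite | github.com/aadelb/loom | src/loom/tools/culture_dna.py | _classify_culture_type
-- ===== SOURCE A (Python) =====
-- from typing import Any
--
-- def _classify_culture_type(signals: list[dict[str, Any]]) -> str:
--     """Classify company culture type based on signals."""
--     startup_indicators = ["innovation", "growth", "dynamic"]
--     corporate_indicators = ["formal", "structured", "process"]
--     balanced_indicators = ["collaboration", "work_life_balance"]
--
--     signal_categories = [s.get("category", "") for s in signals]
--
--     startup_score = sum(1 for cat in signal_categories if cat in startup_indicators)
--     corporate_score = sum(1 for cat in signal_categories if cat in corporate_indicators)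
--     balanced_score = sum(1 for cat in signal_categories if cat in balanced_indicators)
--
--     if startup_score > corporate_score and startup_score > balanced_score:
--         return "startup"
--     elif corporate_score > startup_score and corporate_score > balanced_score:
--         return "corporate"
--     else:
--         return "hybrid"
-- ===== SOURCE B (Python) =====
-- def _classify_culture_type(signals):
--     """Classify culture type by tracking two pairwise margins instead of three counts.
--
--     x = startup_score - corporate_score, y = startup_score - balanced_score.
--     Then startup wins iff x > 0 and y > 0; corporate wins iff x < 0 (corporate > startup)
--     and y > x (corporate > balanced, since co - ba = y - x); otherwise hybrid.
--     """
--     x = 0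
--     y = 0
--     for s in signals:
--         c = s.get("category", "")
--         if c in ("innovation", "growth", "dynamic"):
--             x += 1
--             y += 1
--         elif c in ("formal", "structured", "process"):
--             x -= 1
--         elif c in ("collaboration", "work_life_balance"):
--             y -= 1
--     if x > 0 and y > 0:
--         return "startup"
--     if x < 0 and y > x:
--         return "corporate"
--     return "hybrid"
-- ===== Notes on version B (the rewrite author's own statement) =====
-- stated objective: alternative
-- what changed: Instead of computing three category counts with three membership scans, B makes one pass maintaining two pairwise margins (startup-corporate and startup-balanced) and classifies directly from the signs of the margins, never materialising the counts.
import Mathlib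
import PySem

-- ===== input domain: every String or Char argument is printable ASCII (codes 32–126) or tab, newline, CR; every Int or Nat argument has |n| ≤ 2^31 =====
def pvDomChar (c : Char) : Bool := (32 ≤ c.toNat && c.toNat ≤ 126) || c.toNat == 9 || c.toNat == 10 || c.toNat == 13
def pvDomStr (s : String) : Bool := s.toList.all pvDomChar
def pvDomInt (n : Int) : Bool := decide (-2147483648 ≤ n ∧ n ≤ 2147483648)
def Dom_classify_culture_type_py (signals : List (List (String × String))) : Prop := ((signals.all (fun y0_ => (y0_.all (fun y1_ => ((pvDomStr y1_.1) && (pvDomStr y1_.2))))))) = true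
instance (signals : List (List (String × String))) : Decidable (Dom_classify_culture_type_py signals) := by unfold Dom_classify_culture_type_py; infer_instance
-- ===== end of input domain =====

-- B makes one pass maintaining two pairwise margins (startup-corporate, startup-balanced)
-- and classifies from their signs, instead of A's three membership-scan counts (alternative).


-- ===== PORT A =====
def classify_culture_type_py (signals : List (List (String × String))) : String :=
  let startup_indicators : List String := ["innovation", "growth", "dynamic"]
  let corporate_indicators : List String := ["formal", "structured", "process"]
  let balanced_indicators : List String := ["collaboration", "work_life_balance"]
  let signal_categories := signals.map (fun s => (PySem.Dict.mk s).getD "category" "")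
  let startup_score : Int := signal_categories.foldl (fun acc cat => if cat ∈ startup_indicators then acc + 1 else acc) 0
  let corporate_score : Int := signal_categories.foldl (fun acc cat => if cat ∈ corporate_indicators then acc + 1 else acc) 0
  let balanced_score : Int := signal_categories.foldl (fun acc cat => if cat ∈ balanced_indicators then acc + 1 else acc) 0
  if startup_score > corporate_score ∧ startup_score > balanced_score then "startup"
  else if corporate_score > startup_score ∧ corporate_score > balanced_score then "corporate"
  else "hybrid"

-- ===== PORT B =====
-- B's loop: carry the two margins x = su-co, y = su-ba through the signals.
def pvMargins : List (List (String × String)) → Int → Int → Int × Int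
  | [], x, y => (x, y)
  | s :: r, x, y =>
    let c := (PySem.Dict.mk s).getD "category" ""
    if c = "innovation" ∨ c = "growth" ∨ c = "dynamic" then pvMargins r (x + 1) (y + 1)
    else if c = "formal" ∨ c = "structured" ∨ c = "process" then pvMargins r (x - 1) y
    else if c = "collaboration" ∨ c = "work_life_balance" then pvMargins r x (y - 1)
    else pvMargins r x y

def classify_culture_type_py_alt (signals : List (List (String × String))) : String :=
  let m := pvMargins signals 0 0
  if m.1 > 0 ∧ m.2 > 0 then "startup"
  else if m.1 < 0 ∧ m.2 > m.1 then "corporate"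
  else "hybrid"

-- ===== PRECONDITION & SPEC =====
def Spec_classify_culture_type_py (signals : List (List (String × String))) (out : String) : Prop := out = classify_culture_type_py_alt signals
instance (signals : List (List (String × String))) (out : String) : Decidable (Spec_classify_culture_type_py signals out) := by unfold Spec_classify_culture_type_py; infer_instance

-- ===== CLAIM (what is proved, stated in full; the proofs are below) =====
def Claim_equal_classify_culture_type_py : Prop := ∀ (signals : List (List (String × String))), Dom_classify_culture_type_py signals → Spec_classify_culture_type_py signals (classify_culture_type_py signals)

-- ===== LEMMAS AND PROOFS =====

-- Pulling the accumulator out of A's counting folds.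
theorem pv_foldl_count (L : List String) :
    ∀ (cats : List String) (a : Int),
      cats.foldl (fun acc cat => if cat ∈ L then acc + 1 else acc) a
        = a + cats.foldl (fun acc cat => if cat ∈ L then acc + 1 else acc) 0 := by
  intro cats
  induction cats with
  | nil => simp
  | cons c r ih =>
    intro a
    simp only [List.foldl_cons]
    rw [ih, ih (if c ∈ L then 0 + 1 else 0)]
    split <;> omega

-- B's margin pass equals the differences of A's three counts.
theorem pvMargins_eq :
    ∀ (signals : List (List (String × String))) (x y : Int),
      pvMargins signals x y
        = (x + ((signals.map (fun s => (PySem.Dict.mk s).getD "category" "")).foldl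
              (fun acc cat => if cat ∈ (["innovation", "growth", "dynamic"] : List String) then acc + 1 else acc) 0
            - (signals.map (fun s => (PySem.Dict.mk s).getD "category" "")).foldl
              (fun acc cat => if cat ∈ (["formal", "structured", "process"] : List String) then acc + 1 else acc) 0),
           y + ((signals.map (fun s => (PySem.Dict.mk s).getD "category" "")).foldl
              (fun acc cat => if cat ∈ (["innovation", "growth", "dynamic"] : List String) then acc + 1 else acc) 0
            - (signals.map (fun s => (PySem.Dict.mk s).getD "category" "")).foldl
              (fun acc cat => if cat ∈ (["collaboration", "work_life_balance"] : List String) then acc + 1 else acc) 0)) := by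
  intro signals
  induction signals with
  | nil => intro x y; simp [pvMargins]
  | cons s r ih =>
    intro x y
    simp only [List.map_cons, List.foldl_cons]
    rw [pv_foldl_count (["innovation", "growth", "dynamic"] : List String) (r.map _),
        pv_foldl_count (["formal", "structured", "process"] : List String) (r.map _),
        pv_foldl_count (["collaboration", "work_life_balance"] : List String) (r.map _)]
    set c := (PySem.Dict.mk s).getD "category" "" with hc
    by_cases h1 : c = "innovation" ∨ c = "growth" ∨ c = "dynamic"
    · have hm1 : c ∈ (["innovation", "growth", "dynamic"] : List String) := by
        rcases h1 with h | h | h <;> simp [h]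
      have hm2 : c ∉ (["formal", "structured", "process"] : List String) := by
        rcases h1 with h | h | h <;> simp [h]
      have hm3 : c ∉ (["collaboration", "work_life_balance"] : List String) := by
        rcases h1 with h | h | h <;> simp [h]
      simp only [pvMargins, ← hc, if_pos h1, ih, if_pos hm1, if_neg hm2, if_neg hm3]
      simp only [Prod.mk.injEq]; refine ⟨by ring, by ring⟩
    · by_cases h2 : c = "formal" ∨ c = "structured" ∨ c = "process"
      · have hm1 : c ∉ (["innovation", "growth", "dynamic"] : List String) := by
          rcases h2 with h | h | h <;> simp [h]
        have hm2 : c ∈ (["formal", "structured", "process"] : List String) := by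
          rcases h2 with h | h | h <;> simp [h]
        have hm3 : c ∉ (["collaboration", "work_life_balance"] : List String) := by
          rcases h2 with h | h | h <;> simp [h]
        simp only [pvMargins, ← hc, if_neg h1, if_pos h2, ih, if_pos hm2, if_neg hm1, if_neg hm3]
        simp only [Prod.mk.injEq]; refine ⟨by ring, by ring⟩
      · by_cases h3 : c = "collaboration" ∨ c = "work_life_balance"
        · have hm1 : c ∉ (["innovation", "growth", "dynamic"] : List String) := by
            rcases h3 with h | h <;> simp [h]
          have hm2 : c ∉ (["formal", "structured", "process"] : List String) := by
            rcases h3 with h | h <;> simp [h]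
          have hm3 : c ∈ (["collaboration", "work_life_balance"] : List String) := by
            rcases h3 with h | h <;> simp [h]
          simp only [pvMargins, ← hc, if_neg h1, if_neg h2, if_pos h3, ih, if_pos hm3, if_neg hm1, if_neg hm2]
          simp only [Prod.mk.injEq]; refine ⟨by ring, by ring⟩
        · have hm1 : c ∉ (["innovation", "growth", "dynamic"] : List String) := by
            simp only [List.mem_cons, List.not_mem_nil]
            tauto
          have hm2 : c ∉ (["formal", "structured", "process"] : List String) := by
            simp only [List.mem_cons, List.not_mem_nil]
            tauto
          have hm3 : c ∉ (["collaboration", "work_life_balance"] : List String) := by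
            simp only [List.mem_cons, List.not_mem_nil]
            tauto
          simp only [pvMargins, ← hc, if_neg h1, if_neg h2, if_neg h3, ih, if_neg hm1, if_neg hm2, if_neg hm3]
          simp only [Prod.mk.injEq]; refine ⟨by ring, by ring⟩

-- ===== VERDICT (by name: the statement is the Claim_ definition above) =====
theorem classify_culture_type_py_spec : Claim_equal_classify_culture_type_py := by
  intro signals _
  unfold Spec_classify_culture_type_py classify_culture_type_py classify_culture_type_py_alt
  dsimp only
  rw [pvMargins_eq signals 0 0]
  dsimp only
  set su := (signals.map (fun s => (PySem.Dict.mk s).getD "category" "")).foldl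
    (fun acc cat => if cat ∈ (["innovation", "growth", "dynamic"] : List String) then acc + 1 else acc) (0 : Int)
  set co := (signals.map (fun s => (PySem.Dict.mk s).getD "category" "")).foldl
    (fun acc cat => if cat ∈ (["formal", "structured", "process"] : List String) then acc + 1 else acc) (0 : Int)
  set ba := (signals.map (fun s => (PySem.Dict.mk s).getD "category" "")).foldl
    (fun acc cat => if cat ∈ (["collaboration", "work_life_balance"] : List String) then acc + 1 else acc) (0 : Int)
  split_ifs with hA1 hB1 hA2 hB2 hB1 hB2 <;> first | rfl | (exfalso; omega)
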